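-- pv_equiv track=rewrite | github.com/CIRWEL/anima-mcp | src/anima_mcp/self_reflection.py | _extract_topic_tags_from_text
-- ===== SOURCE A (Python) =====
-- from typing import Optional, List, Dict, Any, Tuple
--
-- def _extract_topic_tags_from_text(text: str) -> List[str]:
--     """Pull coarse reflection topics out of descriptions and pattern text."""
--     text_lower = (text or "").lower()
--     tags = []
--     if "warmth" in text_lower:
--         tags.append("warmth")
--     if "clarity" in text_lower:
--         tags.append("clarity")
--     if "stability" in text_lower or "calm" in text_lower:
--         tags.append("stability")
--     if "presence" in text_lower:
--         tags.append("presence")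
--     if any(token in text_lower for token in ("light", "bright", "dim", "lux")):
--         tags.append("light")
--     if any(token in text_lower for token in ("temperature", "temp", "cool", "warm")):
--         tags.append("ambient_temp")
--     if any(token in text_lower for token in ("humidity", "humid", "dry")):
--         tags.append("humidity")
--     if "pressure" in text_lower:
--         tags.append("pressure")
--     for period in ("morning", "afternoon", "evening", "night"):
--         if period in text_lower:
--             tags.append(period)
--     if "interaction" in text_lower:
--         tags.append("interaction")
--     return tags
-- ===== SOURCE B (Python) =====
-- from typing import Optional, List, Dict, Any, Tuple
--
-- # All keywords the function ever looks for, and the tag each group of keywords names.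
-- _KEYWORDS = ("warmth", "clarity", "stability", "calm", "presence",
--              "light", "bright", "dim", "lux",
--              "temperature", "temp", "cool", "warm",
--              "humidity", "humid", "dry",
--              "pressure", "morning", "afternoon", "evening", "night",
--              "interaction")
--
-- _TAGS = (("warmth", ("warmth",)),
--          ("clarity", ("clarity",)),
--          ("stability", ("stability", "calm")),
--          ("presence", ("presence",)),
--          ("light", ("light", "bright", "dim", "lux")),
--          ("ambient_temp", ("temperature", "temp", "cool", "warm")),
--          ("humidity", ("humidity", "humid", "dry")),
--          ("pressure", ("pressure",)),
--          ("morning", ("morning",)),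
--          ("afternoon", ("afternoon",)),
--          ("evening", ("evening",)),
--          ("night", ("night",)),
--          ("interaction", ("interaction",)))
--
-- def _extract_topic_tags_from_text(text: str) -> List[str]:
--     """Pull coarse reflection topics out of descriptions and pattern text."""
--     text_lower = (text or "").lower()
--     # Single scan over the text: at each position collect every keyword that starts there.
--     found = set()
--     for i in range(len(text_lower)):
--         for kw in _KEYWORDS:
--             if text_lower.startswith(kw, i):
--                 found.add(kw)
--     # Derive the tags from the matched-keyword set, in the fixed report order.
--     return [tag for tag, kws in _TAGS if not found.isdisjoint(kws)]
-- ===== Notes on version B (the rewrite author's own statement) =====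
-- stated objective: alternative
-- what changed: Instead of running an independent substring search over the text for each keyword, B makes one positional scan of the text collecting every keyword that starts at each position into a matched-keyword set, and then derives the tags from that set; same asymptotic cost, different traversal.
import Mathlib
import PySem

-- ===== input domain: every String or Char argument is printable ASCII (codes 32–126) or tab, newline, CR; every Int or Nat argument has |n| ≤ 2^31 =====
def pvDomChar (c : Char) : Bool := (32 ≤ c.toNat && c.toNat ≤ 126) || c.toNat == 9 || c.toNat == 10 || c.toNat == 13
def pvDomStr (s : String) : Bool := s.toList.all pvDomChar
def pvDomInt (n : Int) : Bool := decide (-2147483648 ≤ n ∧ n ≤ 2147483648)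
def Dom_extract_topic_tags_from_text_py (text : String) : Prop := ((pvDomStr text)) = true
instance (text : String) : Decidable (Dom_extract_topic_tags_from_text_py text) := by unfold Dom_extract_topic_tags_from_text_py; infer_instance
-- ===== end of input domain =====

-- B replaces A's per-keyword substring searches by one positional scan of the text that
-- collects every keyword starting at each position into a matched-keyword set, then derives
-- the tags from that set (objective: alternative; same cost, different traversal).

-- ===== PORT A =====
-- literal transliteration: chain of ifs appending to tags, then the period loop
def extract_topic_tags_from_text_py (text : String) : List String :=
  let text_lower := PySem.Str.lower text  -- (text or "").lower(): for str arguments identical to text.lower()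
  let tags : List String := []
  let tags := if PySem.Str.isIn "warmth" text_lower then tags ++ ["warmth"] else tags
  let tags := if PySem.Str.isIn "clarity" text_lower then tags ++ ["clarity"] else tags
  let tags := if PySem.Str.isIn "stability" text_lower || PySem.Str.isIn "calm" text_lower then tags ++ ["stability"] else tags
  let tags := if PySem.Str.isIn "presence" text_lower then tags ++ ["presence"] else tags
  let tags := if ["light", "bright", "dim", "lux"].any (fun token => PySem.Str.isIn token text_lower) then tags ++ ["light"] else tags
  let tags := if ["temperature", "temp", "cool", "warm"].any (fun token => PySem.Str.isIn token text_lower) then tags ++ ["ambient_temp"] else tags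
  let tags := if ["humidity", "humid", "dry"].any (fun token => PySem.Str.isIn token text_lower) then tags ++ ["humidity"] else tags
  let tags := if PySem.Str.isIn "pressure" text_lower then tags ++ ["pressure"] else tags
  let tags := (["morning", "afternoon", "evening", "night"]).foldl
    (fun tags period => if PySem.Str.isIn period text_lower then tags ++ [period] else tags) tags
  let tags := if PySem.Str.isIn "interaction" text_lower then tags ++ ["interaction"] else tags
  tags

-- ===== PORT B =====
def pvKeywords : List String :=
  ["warmth", "clarity", "stability", "calm", "presence",
   "light", "bright", "dim", "lux",
   "temperature", "temp", "cool", "warm",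
   "humidity", "humid", "dry",
   "pressure", "morning", "afternoon", "evening", "night",
   "interaction"]

def pvTagTable : List (String × List String) :=
  [("warmth", ["warmth"]), ("clarity", ["clarity"]), ("stability", ["stability", "calm"]),
   ("presence", ["presence"]), ("light", ["light", "bright", "dim", "lux"]),
   ("ambient_temp", ["temperature", "temp", "cool", "warm"]),
   ("humidity", ["humidity", "humid", "dry"]), ("pressure", ["pressure"]),
   ("morning", ["morning"]), ("afternoon", ["afternoon"]), ("evening", ["evening"]),
   ("night", ["night"]), ("interaction", ["interaction"])]

-- Source B: one scan over positions i of text_lower; text_lower.startswith(kw, i) with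
-- 0 ≤ i < len is exactly a prefix test on the character list dropped at i (PySem.Chars.startswith).
def extract_topic_tags_from_text_py_alt (text : String) : List String :=
  let tl : List Char := (PySem.Str.lower text).toList
  let found : PySem.Set String :=
    (PySem.List.pyRange 0 tl.length 1).foldl
      (fun f i => pvKeywords.foldl
        (fun f kw => if PySem.Chars.startswith (tl.drop i.toNat) kw.toList then PySem.Set.add f kw else f) f)
      PySem.Set.empty
  (pvTagTable.filter (fun e => !(PySem.Set.isdisjoint found e.2))).map (·.1)

-- ===== PRECONDITION & SPEC =====
def Spec_extract_topic_tags_from_text_py (text : String) (out : List String) : Prop := out = extract_topic_tags_from_text_py_alt text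
instance (text : String) (out : List String) : Decidable (Spec_extract_topic_tags_from_text_py text out) := by unfold Spec_extract_topic_tags_from_text_py; infer_instance

-- ===== CLAIM (what is proved, stated in full; the proofs are below) =====
def Claim_equal_extract_topic_tags_from_text_py : Prop := ∀ (text : String), Dom_extract_topic_tags_from_text_py text → Spec_extract_topic_tags_from_text_py text (extract_topic_tags_from_text_py text)

-- ===== LEMMAS AND PROOFS =====

-- membership in the inner fold: x was already in f, or x is a keyword matching at this position
theorem pv_mem_inner (c : String → Bool) (ks : List String) (f : PySem.Set String) (x : String) :
    x ∈ ks.foldl (fun f kw => if c kw then PySem.Set.add f kw else f) f ↔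
      x ∈ f ∨ (x ∈ ks ∧ c x = true) := by
  induction ks generalizing f with
  | nil => simp
  | cons h t ih =>
    by_cases hc : c h = true
    · simp only [List.foldl_cons, if_pos hc, ih, PySem.Set.mem_add, List.mem_cons]
      constructor
      · rintro ((h1 | h1) | ⟨h1, h2⟩)
        · exact Or.inl h1
        · exact Or.inr ⟨Or.inl h1, h1 ▸ hc⟩
        · exact Or.inr ⟨Or.inr h1, h2⟩
      · rintro (h1 | ⟨h1 | h1, h2⟩)
        · exact Or.inl (Or.inl h1)
        · exact Or.inl (Or.inr h1)
        · exact Or.inr ⟨h1, h2⟩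
    · simp only [List.foldl_cons, if_neg hc, ih, List.mem_cons]
      constructor
      · rintro (h1 | ⟨h1, h2⟩)
        · exact Or.inl h1
        · exact Or.inr ⟨Or.inr h1, h2⟩
      · rintro (h1 | ⟨h1 | h1, h2⟩)
        · exact Or.inl h1
        · exact absurd (h1 ▸ h2) hc
        · exact Or.inr ⟨h1, h2⟩

-- membership in the whole scan
theorem pv_mem_scan (c : Int → String → Bool) (l : List Int) (ks : List String)
    (s : PySem.Set String) (x : String) :
    x ∈ l.foldl (fun f i => ks.foldl (fun f kw => if c i kw then PySem.Set.add f kw else f) f) s ↔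
      x ∈ s ∨ (x ∈ ks ∧ ∃ i ∈ l, c i x = true) := by
  induction l generalizing s with
  | nil => simp
  | cons h t ih =>
    simp only [List.foldl_cons, ih, pv_mem_inner, List.mem_cons]
    constructor
    · rintro ((h1 | ⟨h1, h2⟩) | ⟨h1, i, hi, h2⟩)
      · exact Or.inl h1
      · exact Or.inr ⟨h1, h, Or.inl rfl, h2⟩
      · exact Or.inr ⟨h1, i, Or.inr hi, h2⟩
    · rintro (h1 | ⟨h1, i, hi | hi, h2⟩)
      · exact Or.inl (Or.inl h1)
      · exact Or.inl (Or.inr ⟨h1, hi ▸ h2⟩)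
      · exact Or.inr ⟨h1, i, hi, h2⟩

-- a nonempty keyword matches at some position of the scan iff it is a substring
theorem pv_exists_pos_iff_isIn (tl : List Char) (kw : List Char) (hne : kw ≠ []) :
    (∃ i ∈ PySem.List.pyRange 0 tl.length 1,
        PySem.Chars.startswith (tl.drop i.toNat) kw = true) ↔
      PySem.Chars.isIn kw tl = true := by
  rw [← PySem.Chars.exists_prefix_drop_iff_isIn]
  constructor
  · rintro ⟨i, _, hs⟩
    exact ⟨i.toNat, (PySem.Chars.startswith_iff _ _).mp hs⟩
  · rintro ⟨j, hp⟩
    have hj : j < tl.length := by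
      by_contra h
      rw [List.drop_eq_nil_of_le (by omega)] at hp
      exact hne (List.prefix_nil.mp hp)
    refine ⟨(j : Int), ?_, ?_⟩
    · rw [PySem.List.mem_pyRange_one]; omega
    · rw [PySem.Chars.startswith_iff]; simpa using hp

-- the per-entry condition of B equals A's "any keyword is a substring" condition
theorem pv_cond_eq (text : String) (e : String × List String) (he : e ∈ pvTagTable) :
    (!(PySem.Set.isdisjoint
        ((PySem.List.pyRange 0 (PySem.Str.lower text).toList.length 1).foldl
          (fun f i => pvKeywords.foldl
            (fun f kw => if PySem.Chars.startswith ((PySem.Str.lower text).toList.drop i.toNat) kw.toList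
                         then PySem.Set.add f kw else f) f)
          PySem.Set.empty) e.2)) =
      e.2.any (fun p => PySem.Str.isIn p (PySem.Str.lower text)) := by
  have hsub : ∀ x ∈ e.2, x ∈ pvKeywords ∧ x.toList ≠ [] := by
    have : ∀ e ∈ pvTagTable, ∀ x ∈ e.2, x ∈ pvKeywords ∧ x.toList ≠ [] := by decide
    exact this e he
  rw [Bool.eq_iff_iff]
  simp only [PySem.Set.isdisjoint, Bool.not_not, List.any_eq_true, PySem.Set.contains,
    List.contains_iff_mem, pv_mem_scan, PySem.Str.isIn, PySem.Str.toList_lower]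
  constructor
  · rintro ⟨x, (h0 | ⟨hk, hex⟩), hx2⟩
    · simp [PySem.Set.empty] at h0
    · exact ⟨x, hx2, (pv_exists_pos_iff_isIn _ _ (hsub x hx2).2).mp hex⟩
  · rintro ⟨x, hx2, hin⟩
    exact ⟨x, Or.inr ⟨(hsub x hx2).1, (pv_exists_pos_iff_isIn _ _ (hsub x hx2).2).mpr hin⟩, hx2⟩

-- a left fold that conditionally appends singletons is filter-then-map
theorem pv_filter_map_eq_foldl {α : Type} (cond : α × List String → Bool)
    (l : List (α × List String)) (acc : List α) :
    acc ++ (l.filter cond).map (·.1) = l.foldl (fun tags e => if cond e then tags ++ [e.1] else tags) acc := by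
  induction l generalizing acc with
  | nil => simp
  | cons h t ih =>
    by_cases hc : cond h <;> simp [hc, ← ih]

-- ===== VERDICT (by name: the statement is the Claim_ definition above) =====
theorem extract_topic_tags_from_text_py_spec : Claim_equal_extract_topic_tags_from_text_py := by
  intro t _
  show extract_topic_tags_from_text_py t = extract_topic_tags_from_text_py_alt t
  simp only [extract_topic_tags_from_text_py_alt]
  rw [List.filter_congr (fun e he => pv_cond_eq t e he)]
  rw [← List.nil_append ((pvTagTable.filter _).map _), pv_filter_map_eq_foldl]
  simp only [extract_topic_tags_from_text_py, pvTagTable, List.foldl, List.any, Bool.or_false]
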